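-- pv_equiv track=rewrite | github.com/derek3411888/file-organizer | FileOrganizer.py | categorize_exts
-- ===== SOURCE A (Python) =====
-- CATEGORY_MAP = {
--     "影片": {"mp4","mkv","avi","mov","wmv","flv","m4v","ts","webm"},
--     "音訊": {"mp3","wav","flac","m4a","aac","ogg","wma","aiff","alac"},
--     "影像": {"jpg","jpeg","png","gif","bmp","tiff","tif","webp","heic","raw","cr2","nef","arw"},
--     "PDF": {"pdf"},
--     "文件": {"txt","md","rtf","doc","docx","odt","epub"},
--     "表格": {"xls","xlsx","csv","ods"},
--     "簡報": {"ppt","pptx","odp","key"},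
--     "壓縮": {"zip","rar","7z","tar","gz","bz2"},
--     "程式碼": {"py","pyw","js","ts","java","c","cpp","cs","go","rs","rb","php","sh","bat","ps1","html","css","json","xml","yaml","yml"},
--     "字型": {"ttf","otf","woff","woff2"},
-- }
--
-- def categorize_exts(exts):
--     cats = {k: [] for k in CATEGORY_MAP}
--     cats["其他"] = []; cats["無副檔名"] = []
--     for e in sorted(exts):
--         if e == "_noext": cats["無副檔名"].append(e); continue
--         placed = False
--         for cat, s in CATEGORY_MAP.items():
--             if e in s: cats[cat].append(e); placed = True; break
--         if not placed: cats["其他"].append(e)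
--     return {k: v for k, v in cats.items() if v}
-- ===== SOURCE B (Python) =====
-- CATEGORY_MAP = {
--     "影片": {"mp4","mkv","avi","mov","wmv","flv","m4v","ts","webm"},
--     "音訊": {"mp3","wav","flac","m4a","aac","ogg","wma","aiff","alac"},
--     "影像": {"jpg","jpeg","png","gif","bmp","tiff","tif","webp","heic","raw","cr2","nef","arw"},
--     "PDF": {"pdf"},
--     "文件": {"txt","md","rtf","doc","docx","odt","epub"},
--     "表格": {"xls","xlsx","csv","ods"},
--     "簡報": {"ppt","pptx","odp","key"},
--     "壓縮": {"zip","rar","7z","tar","gz","bz2"},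
--     "程式碼": {"py","pyw","js","ts","java","c","cpp","cs","go","rs","rb","php","sh","bat","ps1","html","css","json","xml","yaml","yml"},
--     "字型": {"ttf","otf","woff","woff2"},
-- }
--
-- def categorize_exts(exts):
--     # Category-major grouping over a multiplicity counter: count every extension once,
--     # sort only the distinct extensions, then sweep the categories in order, each
--     # category claiming the distinct extensions it is the first to contain and
--     # emitting them with their multiplicities.
--     counts = {}
--     for e in exts:
--         counts[e] = counts.get(e, 0) + 1
--     keys = sorted(counts)
--     out = {}
--     claimed = set()
--     for cat, members in CATEGORY_MAP.items():
--         bucket = []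
--         for e in keys:
--             if e != "_noext" and e in members and e not in claimed:
--                 claimed.add(e)
--                 bucket += [e] * counts[e]
--         if bucket:
--             out[cat] = bucket
--     other = []
--     for e in keys:
--         if e != "_noext" and e not in claimed:
--             other += [e] * counts[e]
--     if other:
--         out["其他"] = other
--     if "_noext" in counts:
--         out["無副檔名"] = ["_noext"] * counts["_noext"]
--     return out
-- ===== Notes on version B (the rewrite author's own statement) =====
-- stated objective: alternative
-- what changed: A dispatches element-major: it sorts the whole list and scans the categories for each element; B groups category-major over a multiplicity counter: it counts every extension once, sorts only the distinct extensions, then sweeps the categories in order, each category claiming the distinct extensions it is the first to contain and emitting them with their multiplicities.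
import Mathlib
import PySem

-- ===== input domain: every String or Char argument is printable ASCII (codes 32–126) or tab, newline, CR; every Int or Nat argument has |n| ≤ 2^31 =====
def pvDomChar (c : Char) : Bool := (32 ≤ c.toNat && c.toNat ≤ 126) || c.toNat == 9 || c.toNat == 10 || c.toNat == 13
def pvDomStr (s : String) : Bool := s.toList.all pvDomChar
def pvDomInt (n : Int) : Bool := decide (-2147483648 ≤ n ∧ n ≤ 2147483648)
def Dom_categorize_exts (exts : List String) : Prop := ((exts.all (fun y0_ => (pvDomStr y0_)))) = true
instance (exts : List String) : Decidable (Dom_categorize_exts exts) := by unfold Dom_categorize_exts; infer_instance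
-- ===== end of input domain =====

-- B groups category-major over a multiplicity counter (count once, sort only the
-- distinct extensions, each category claims in order the distinct extensions it is
-- the first to contain), instead of A's element-major dispatch over the sorted list.

-- module constant shared by both Pythons (dict of sets: assoc list of distinct-element lists)
def CATEGORY_MAP : List (String × List String) := [
  ("影片", ["mp4","mkv","avi","mov","wmv","flv","m4v","ts","webm"]),
  ("音訊", ["mp3","wav","flac","m4a","aac","ogg","wma","aiff","alac"]),
  ("影像", ["jpg","jpeg","png","gif","bmp","tiff","tif","webp","heic","raw","cr2","nef","arw"]),
  ("PDF", ["pdf"]),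
  ("文件", ["txt","md","rtf","doc","docx","odt","epub"]),
  ("表格", ["xls","xlsx","csv","ods"]),
  ("簡報", ["ppt","pptx","odp","key"]),
  ("壓縮", ["zip","rar","7z","tar","gz","bz2"]),
  ("程式碼", ["py","pyw","js","ts","java","c","cpp","cs","go","rs","rb","php","sh","bat","ps1","html","css","json","xml","yaml","yml"]),
  ("字型", ["ttf","otf","woff","woff2"])]

-- ===== PORT A =====
-- A's inner 'for cat, s in CATEGORY_MAP.items(): if e in s: …; break'
def firstCat (e : String) : List (String × List String) → Option String
  | [] => none
  | p :: rest => if p.2.contains e then some p.1 else firstCat e rest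

def categorize_exts (exts : List String) : List (String × List String) :=
  let cats0 : PySem.Dict String (List String) :=
    ((CATEGORY_MAP.foldl (fun d p => d.insert p.1 []) PySem.Dict.empty).insert "其他" []).insert "無副檔名" []
  let cats := (PySem.List.sorted exts (fun x => x) false).foldl (fun cats e =>
    if e == "_noext" then cats.modify "無副檔名" [] (· ++ [e])
    else
      match firstCat e CATEGORY_MAP with
      | some cat => cats.modify cat [] (· ++ [e])
      | none => cats.modify "其他" [] (· ++ [e])) cats0
  cats.items.filter (fun p => !p.2.isEmpty)

-- ===== PORT B =====
-- B: count multiplicities, sort the distinct extensions, then sweep the categories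
-- in order, each claiming the distinct extensions it is the first to contain.
-- body of B's inner 'for e in keys:' loop
def bInnerStep (counts : PySem.Dict String Int) (q : String × List String)
    (bc : List String × PySem.Set String) (e : String) : List String × PySem.Set String :=
  if e ≠ "_noext" ∧ PySem.Set.contains q.2 e ∧ ¬ PySem.Set.contains bc.2 e then
    (bc.1 ++ PySem.List.pyRepeat [e] (counts.getD e 0), PySem.Set.add bc.2 e)
  else bc

-- body of B's outer 'for cat, members in CATEGORY_MAP.items():' loop
def bCatStep (counts : PySem.Dict String Int) (keys : List String)
    (st : PySem.Dict String (List String) × PySem.Set String) (q : String × List String) :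
    PySem.Dict String (List String) × PySem.Set String :=
  let bc := keys.foldl (bInnerStep counts q) ([], st.2)
  ((if bc.1.isEmpty then st.1 else st.1.insert q.1 bc.1), bc.2)

def categorize_exts_alt (exts : List String) : List (String × List String) :=
  let counts : PySem.Dict String Int :=
    exts.foldl (fun d e => d.insert e (d.getD e 0 + 1)) PySem.Dict.empty
  let keys := PySem.List.sorted counts.keys (fun x => x) false
  let st := CATEGORY_MAP.foldl (bCatStep counts keys) (PySem.Dict.empty, PySem.Set.empty)
  let other := keys.foldl
    (fun acc e =>
      if e ≠ "_noext" ∧ ¬ PySem.Set.contains st.2 e then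
        acc ++ PySem.List.pyRepeat [e] (counts.getD e 0)
      else acc) []
  let out1 := if other.isEmpty then st.1 else st.1.insert "其他" other
  let out2 := if counts.contains "_noext" then
      out1.insert "無副檔名" (PySem.List.pyRepeat ["_noext"] (counts.getD "_noext" 0))
    else out1
  out2.items

-- ===== PRECONDITION & SPEC =====
def Spec_categorize_exts (exts : List String) (out : List (String × List String)) : Prop := out = categorize_exts_alt exts
instance (exts : List String) (out : List (String × List String)) : Decidable (Spec_categorize_exts exts out) := by unfold Spec_categorize_exts; infer_instance

-- ===== CLAIM =====
def Claim_equal_categorize_exts : Prop := ∀ (exts : List String), Dom_categorize_exts exts → Spec_categorize_exts exts (categorize_exts exts)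

-- ===== LEMMAS AND PROOFS =====

-- the classification A computes for one extension
def clsE (e : String) : String :=
  if e = "_noext" then "無副檔名" else (firstCat e CATEGORY_MAP).getD "其他"

def allKeys : List String := CATEGORY_MAP.map Prod.fst ++ ["其他", "無副檔名"]

-- sorted input and sorted distinct keys
def pvS (exts : List String) : List String := PySem.List.sorted exts (fun x => x) false
def pvK (exts : List String) : List String :=
  PySem.List.sorted (PySem.Set.ofList exts) (fun x => x) false

lemma firstCat_append (e : String) (P L : List (String × List String)) :
    firstCat e (P ++ L) = (firstCat e P).or (firstCat e L) := by
  induction P with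
  | nil => simp [firstCat]
  | cons p P ih => by_cases h : e ∈ p.2 <;> simp [firstCat, h, ih]

lemma firstCat_mem (e c : String) (L : List (String × List String)) :
    firstCat e L = some c → c ∈ L.map Prod.fst := by
  induction L with
  | nil => simp [firstCat]
  | cons p P ih =>
    intro hfc
    simp only [firstCat] at hfc
    split at hfc
    · injection hfc with hc
      simp [← hc]
    · simp only [List.map_cons, List.mem_cons]
      exact Or.inr (ih hfc)

lemma clsE_mem_allKeys (e : String) : clsE e ∈ allKeys := by
  unfold clsE allKeys
  by_cases h : e = "_noext"
  · simp [h]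
  · simp only [if_neg h]
    cases hfc : firstCat e CATEGORY_MAP with
    | none => simp
    | some c => simp [firstCat_mem e c CATEGORY_MAP hfc]

lemma set_update_of_subset (s : PySem.Set String) (l : List String)
    (h : ∀ x ∈ l, x ∈ s) : PySem.Set.update s l = s := by
  induction l generalizing s with
  | nil => rfl
  | cons x l ih =>
    have hmem : x ∈ s := h x (by simp)
    have hx : PySem.Set.add s x = s := by
      simp [PySem.Set.add, PySem.Set.contains, hmem]
    simp only [PySem.Set.update, List.foldl_cons, hx]
    exact ih s (fun y hy => h y (by simp [hy]))

def pvCats0 : PySem.Dict String (List String) :=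
  ((CATEGORY_MAP.foldl (fun d p => d.insert p.1 []) PySem.Dict.empty).insert "其他" []).insert "無副檔名" []

lemma stepA_eq :
    (fun (cats : PySem.Dict String (List String)) (e : String) =>
      if e == "_noext" then cats.modify "無副檔名" [] (· ++ [e])
      else match firstCat e CATEGORY_MAP with
        | some cat => cats.modify cat [] (· ++ [e])
        | none => cats.modify "其他" [] (· ++ [e]))
    = fun cats e => cats.modify (clsE e) [] (· ++ [e]) := by
  funext cats e
  by_cases h : e = "_noext"
  · simp [clsE, h]
  · have hb : (e == "_noext") = false := by simpa using h
    rw [hb]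
    simp only [Bool.false_eq_true, if_false, clsE, if_neg h]
    cases firstCat e CATEGORY_MAP <;> simp

lemma keys_pvCats0 : pvCats0.keys = allKeys := by decide

lemma getD_const (d : PySem.Dict String (List String)) (h : ∀ p ∈ d.items, p.2 = ([] : List String))
    (k : String) : d.getD k [] = [] := by
  simp only [PySem.Dict.getD, PySem.Dict.get?]
  cases hf : List.find? (fun p => p.1 == k) d.items with
  | none => rfl
  | some p => exact h p (List.mem_of_find?_eq_some hf)

lemma getD_pvCats0 (k : String) : pvCats0.getD k [] = [] := by
  refine getD_const _ (fun p hp => ?_) k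
  have : pvCats0.items = allKeys.map (fun k => (k, ([] : List String))) := by decide
  rw [this] at hp
  obtain ⟨a, -, rfl⟩ := List.mem_map.mp hp
  rfl

-- A in normal form
lemma A_norm (exts : List String) :
    categorize_exts exts =
      (allKeys.map (fun k => (k, (pvS exts).filter (fun e => clsE e == k)))).filter
        (fun p => !p.2.isEmpty) := by
  have hD1 : ∀ k, ((pvS exts).foldl (fun cats e => cats.modify (clsE e) [] (· ++ [e])) pvCats0).getD k []
      = (pvS exts).filter (fun e => clsE e == k) := by
    intro k
    have : (pvS exts).foldl (fun cats e => cats.modify (clsE e) [] (· ++ [e])) pvCats0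
        = ((pvS exts).map (fun e => (clsE e, e))).foldl (fun d p => d.modify p.1 [] (· ++ [p.2])) pvCats0 := by
      rw [List.foldl_map]
    rw [this, PySem.Dict.getD_foldl_modify_append, getD_pvCats0, List.filter_map, List.map_map]
    simp [Function.comp_def]
  have hkeys : ((pvS exts).foldl (fun cats e => cats.modify (clsE e) [] (· ++ [e])) pvCats0).keys = allKeys := by
    rw [PySem.Dict.keys_foldl_modify_key (pvS exts) clsE [] (fun _ e => (· ++ [e])) pvCats0, keys_pvCats0]
    exact set_update_of_subset _ _ (by intro x hx; obtain ⟨e, -, rfl⟩ := List.mem_map.mp hx; exact clsE_mem_allKeys e)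
  have hitems := PySem.Dict.items_eq_map_keys
    ((pvS exts).foldl (fun cats e => cats.modify (clsE e) [] (· ++ [e])) pvCats0)
    (by rw [hkeys]; decide) ([] : List String)
  rw [hkeys] at hitems
  simp only [hD1] at hitems
  show ((pvS exts).foldl _ pvCats0).items.filter (fun p => !p.2.isEmpty) = _
  rw [stepA_eq, hitems]

-- ===== B-side lemmas =====

lemma mem_update (c : PySem.Set String) (l : List String) (e : String) :
    e ∈ PySem.Set.update c l ↔ e ∈ c ∨ e ∈ l := by
  induction l generalizing c with
  | nil => simp [PySem.Set.update]
  | cons x l ih =>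
    simp only [PySem.Set.update, List.foldl_cons] at *
    rw [ih (PySem.Set.add c x), PySem.Set.mem_add]
    simp [or_assoc, or_comm, or_left_comm]

lemma pvK_nodup (exts : List String) : (pvK exts).Nodup :=
  ((PySem.List.sorted_perm (PySem.Set.ofList exts) (fun x => x) false).nodup_iff).mpr
    (PySem.Set.nodup_ofList exts)

lemma mem_pvK (exts : List String) (e : String) : e ∈ pvK exts ↔ e ∈ exts := by
  rw [pvK, (PySem.List.sorted_perm (PySem.Set.ofList exts) (fun x => x) false).mem_iff]
  exact PySem.Set.mem_ofList exts e

lemma count_flat (exts : List String) (ks : List String) (hnd : ks.Nodup) (a : String) :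
    (ks.flatMap (fun k => List.replicate (exts.count k) k)).count a
      = if a ∈ ks then exts.count a else 0 := by
  induction ks with
  | nil => simp
  | cons k ks ih =>
    rw [List.nodup_cons] at hnd
    obtain ⟨hk, hnd'⟩ := hnd
    rw [List.flatMap_cons, List.count_append, ih hnd']
    by_cases h : a = k
    · subst h
      simp [hk]
    · have hk' : (k == a) = false := by simpa using fun hh => h hh.symm
      simp [List.count_replicate, hk', List.mem_cons, h]

lemma pw_flat (n : String → Nat) (ks : List String) (h : ks.Pairwise (· < ·)) :
    (ks.flatMap (fun k => List.replicate (n k) k)).Pairwise (· ≤ ·) := by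
  induction ks with
  | nil => simp
  | cons k ks ih =>
    rw [List.pairwise_cons] at h
    obtain ⟨h1, h2⟩ := h
    rw [List.flatMap_cons, List.pairwise_append]
    refine ⟨List.pairwise_replicate.mpr (Or.inr le_rfl), ih h2, ?_⟩
    intro a ha b hb
    obtain rfl := List.eq_of_mem_replicate ha
    obtain ⟨k', hk', hb'⟩ := List.mem_flatMap.mp hb
    obtain rfl := List.eq_of_mem_replicate hb'
    exact le_of_lt (h1 _ hk')

lemma S_flat (exts : List String) :
    pvS exts = (pvK exts).flatMap (fun k => List.replicate (exts.count k) k) := by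
  have hFperm : ((pvK exts).flatMap (fun k => List.replicate (exts.count k) k)).Perm exts := by
    rw [List.perm_iff_count]
    intro a
    rw [count_flat exts (pvK exts) (pvK_nodup exts) a]
    by_cases h : a ∈ pvK exts
    · simp [h]
    · rw [if_neg h]
      exact (List.count_eq_zero.mpr (fun hmem => h ((mem_pvK exts a).mpr hmem))).symm
  have hK : (pvK exts).Pairwise (· < ·) := by
    have := (PySem.List.sorted_pairwise (PySem.Set.ofList exts) (fun x => x)).and (pvK_nodup exts)
    exact this.imp (fun h => lt_of_le_of_ne h.1 h.2)
  refine PySem.List.eq_of_perm_of_pairwise_le_of_injective (fun x => x) (fun a b h => h) ?_ ?_ ?_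
  · exact (PySem.List.sorted_perm exts (fun x => x) false).trans hFperm.symm
  · exact PySem.List.sorted_pairwise exts (fun x => x)
  · exact pw_flat _ _ hK

lemma filter_flatMap_rep (p : String → Bool) (n : String → Nat) (ks : List String) :
    (ks.flatMap (fun k => List.replicate (n k) k)).filter p
      = (ks.filter p).flatMap (fun k => List.replicate (n k) k) := by
  induction ks with
  | nil => simp
  | cons k ks ih =>
    rw [List.flatMap_cons, List.filter_append, List.filter_replicate, ih, List.filter_cons]
    by_cases h : p k <;> simp [h]

lemma flatMap_congr_mem {l : List String} {f g : String → List String}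
    (h : ∀ x ∈ l, f x = g x) : l.flatMap f = l.flatMap g := by
  induction l with
  | nil => rfl
  | cons x l ih =>
    rw [List.flatMap_cons, List.flatMap_cons, h x (by simp),
      ih (fun y hy => h y (by simp [hy]))]

lemma contains_iff_mem (s : List String) (x : String) :
    PySem.Set.contains s x = true ↔ x ∈ s := by
  simp [PySem.Set.contains]

lemma innerLoop (rp : String → List String) (memset : List String) :
    ∀ (ks : List String) (b : List String) (c : PySem.Set String), ks.Nodup →
    ks.foldl (fun (bc : List String × PySem.Set String) e =>
        if e ≠ "_noext" ∧ PySem.Set.contains memset e ∧ ¬ PySem.Set.contains bc.2 e then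
          (bc.1 ++ rp e, PySem.Set.add bc.2 e)
        else bc) (b, c)
      = (b ++ (ks.filter (fun x => decide (x ≠ "_noext" ∧ x ∈ memset ∧ x ∉ c))).flatMap rp,
         PySem.Set.update c (ks.filter (fun x => decide (x ≠ "_noext" ∧ x ∈ memset ∧ x ∉ c)))) := by
  intro ks
  induction ks with
  | nil => intro b c _; simp [PySem.Set.update]
  | cons e ks ih =>
    intro b c hnd
    rw [List.nodup_cons] at hnd
    obtain ⟨he, hnd'⟩ := hnd
    have hcongr : ∀ x ∈ ks,
        (decide (x ≠ "_noext" ∧ x ∈ memset ∧ x ∉ PySem.Set.add c e))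
          = (decide (x ≠ "_noext" ∧ x ∈ memset ∧ x ∉ c)) := by
      intro x hx
      have hxe : x ≠ e := fun hh => he (hh ▸ hx)
      simp [PySem.Set.mem_add, hxe]
    by_cases h : e ≠ "_noext" ∧ PySem.Set.contains memset e ∧ ¬ PySem.Set.contains c e
    · have hp : (decide (e ≠ "_noext" ∧ e ∈ memset ∧ e ∉ c)) = true := by
        simp only [decide_eq_true_eq]
        refine ⟨h.1, (contains_iff_mem _ _).mp h.2.1, fun hm => h.2.2 ((contains_iff_mem _ _).mpr hm)⟩
      rw [List.foldl_cons, if_pos h, ih (b ++ rp e) (PySem.Set.add c e) hnd',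
        List.filter_congr hcongr]
      simp only [List.filter_cons, hp, if_true, List.flatMap_cons]
      exact Prod.ext (by simp [List.append_assoc]) (by simp [PySem.Set.update])
    · have hp : (decide (e ≠ "_noext" ∧ e ∈ memset ∧ e ∉ c)) = false := by
        simp only [decide_eq_false_iff_not]
        intro hh
        exact h ⟨hh.1, (contains_iff_mem _ _).mpr hh.2.1, fun hm => hh.2.2 ((contains_iff_mem _ _).mp hm)⟩
      rw [List.foldl_cons, if_neg h, ih b c hnd']
      simp only [List.filter_cons, hp, Bool.false_eq_true, if_false]

lemma rp_eq (exts : List String) (e : String) :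
    PySem.List.pyRepeat [e] ((PySem.Dict.counter exts).getD e 0) = List.replicate (exts.count e) e := by
  rw [PySem.Dict.getD_counter, PySem.List.pyRepeat_singleton]; simp

lemma outerLoop (exts : List String) :
    ∀ (L P : List (String × List String)) (d : PySem.Dict String (List String)) (c : PySem.Set String),
    ((P ++ L).map Prod.fst).Nodup →
    (∀ e, e ∈ c ↔ (e ∈ pvK exts ∧ e ≠ "_noext" ∧ (firstCat e P).isSome = true)) →
    (∀ k, d.contains k = true → k ∈ P.map Prod.fst) →
    (L.foldl (bCatStep (PySem.Dict.counter exts) (pvK exts)) (d, c)).1.items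
        = d.items ++ (L.map (fun q => (q.1, (pvS exts).filter (fun e =>
            decide (e ≠ "_noext") && (firstCat e (P ++ L) == some q.1))))).filter (fun r => !r.2.isEmpty)
      ∧ (∀ e, e ∈ (L.foldl (bCatStep (PySem.Dict.counter exts) (pvK exts)) (d, c)).2 ↔
          (e ∈ pvK exts ∧ e ≠ "_noext" ∧ (firstCat e (P ++ L)).isSome = true))
      ∧ (∀ k, (L.foldl (bCatStep (PySem.Dict.counter exts) (pvK exts)) (d, c)).1.contains k = true → k ∈ (P ++ L).map Prod.fst) := by
  intro L
  induction L with
  | nil =>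
    intro P d c hnd hc hsub
    exact ⟨by simp, fun e => by simpa using hc e, fun k hk => by simpa using hsub k hk⟩
  | cons q L ih =>
    intro P d c hnd hc hsub
    -- key-distinctness facts
    have hndflat : ((P.map Prod.fst) ++ (q.1 :: L.map Prod.fst)).Nodup := by
      simpa using hnd
    rw [List.nodup_append] at hndflat
    obtain ⟨hndP, hndqL, hdisj⟩ := hndflat
    have hq1P : q.1 ∉ P.map Prod.fst := fun hh => hdisj q.1 hh q.1 (by simp) rfl
    have hq1L : q.1 ∉ L.map Prod.fst := (List.nodup_cons.mp hndqL).1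
    have hPL : (P ++ [q]) ++ L = P ++ q :: L := by simp
    -- one step of the fold
    have hbc := innerLoop (fun e => PySem.List.pyRepeat [e] ((PySem.Dict.counter exts).getD e 0))
      q.2 (pvK exts) [] c (pvK_nodup exts)
    -- predicate conversion on the distinct keys
    have hmatch : ∀ x ∈ pvK exts,
        (decide (x ≠ "_noext" ∧ x ∈ q.2 ∧ x ∉ c))
          = (decide (x ≠ "_noext") && (firstCat x (P ++ q :: L) == some q.1)) := by
      intro x hx
      by_cases hxn : x = "_noext"
      · simp [hxn]
      · rw [firstCat_append]
        cases hP : firstCat x P with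
        | some y =>
          have hxc : x ∈ c := (hc x).mpr ⟨hx, hxn, by simp [hP]⟩
          have hy : y ∈ P.map Prod.fst := firstCat_mem _ _ _ hP
          have hyq : y ≠ q.1 := fun hh => hq1P (hh ▸ hy)
          simp [hxc, hyq]
        | none =>
          have hxc : x ∉ c := fun hm => by
            have := ((hc x).mp hm).2.2
            simp [hP] at this
          by_cases hq2 : x ∈ q.2
          · have hfc : firstCat x (q :: L) = some q.1 := by simp [firstCat, hq2]
            simp [hxn, hq2, hxc, hfc]
          · have hfl : firstCat x (q :: L) = firstCat x L := by simp [firstCat, hq2]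
            have hne : (firstCat x L == some q.1) = false := by
              cases hL : firstCat x L with
              | none => simp
              | some z =>
                have hz := firstCat_mem _ _ _ hL
                have : z ≠ q.1 := fun hh => hq1L (hh ▸ hz)
                simp [this]
            simp [hxn, hq2, hfl, hne]
    -- the bucket produced for q, in sorted-input form
    have hbucket : (List.filter (fun x => decide (x ≠ "_noext" ∧ x ∈ q.2 ∧ x ∉ c)) (pvK exts)).flatMap
          (fun e => PySem.List.pyRepeat [e] ((PySem.Dict.counter exts).getD e 0))
        = (pvS exts).filter (fun e =>
            decide (e ≠ "_noext") && (firstCat e (P ++ q :: L) == some q.1)) := by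
      rw [List.filter_congr hmatch,
        flatMap_congr_mem (fun x _ => rp_eq exts x),
        ← filter_flatMap_rep _ (fun k => exts.count k) (pvK exts), ← S_flat]
    -- the claimed-set invariant after q
    have hc2 : ∀ e, e ∈ PySem.Set.update c
          (List.filter (fun x => decide (x ≠ "_noext" ∧ x ∈ q.2 ∧ x ∉ c)) (pvK exts)) ↔
        (e ∈ pvK exts ∧ e ≠ "_noext" ∧ (firstCat e (P ++ [q])).isSome = true) := by
      intro e
      simp only [mem_update, List.mem_filter, decide_eq_true_eq, firstCat_append, hc e]
      by_cases hxn : e = "_noext"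
      · simp [hxn]
      · cases hP : firstCat e P with
        | some y => simp [hxn]; tauto
        | none =>
          by_cases hq2 : e ∈ q.2 <;> simp [hxn, hq2, firstCat] <;> tauto
    -- names for the step results
    set bktS := (pvS exts).filter (fun e =>
      decide (e ≠ "_noext") && (firstCat e (P ++ q :: L) == some q.1)) with hbktS
    set flt := List.filter (fun x => decide (x ≠ "_noext" ∧ x ∈ q.2 ∧ x ∉ c)) (pvK exts) with hflt
    have hlam : (fun (bc : List String × PySem.Set String) e =>
        if e ≠ "_noext" ∧ PySem.Set.contains q.2 e ∧ ¬ PySem.Set.contains bc.2 e then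
          (bc.1 ++ (fun e => PySem.List.pyRepeat [e] ((PySem.Dict.counter exts).getD e 0)) e,
            PySem.Set.add bc.2 e)
        else bc) = bInnerStep (PySem.Dict.counter exts) q := rfl
    rw [hlam] at hbc
    have hstep : bCatStep (PySem.Dict.counter exts) (pvK exts) (d, c) q
        = ((if bktS.isEmpty then d else d.insert q.1 bktS), PySem.Set.update c flt) := by
      simp only [bCatStep]
      rw [hbc]
      simp only [List.nil_append, hbucket]
    have hdq1 : d.contains q.1 = false := by
      cases hdc : d.contains q.1
      · rfl
      · exact absurd (hsub _ hdc) hq1P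
    have hsub2 : ∀ k, (if bktS.isEmpty then d else d.insert q.1 bktS).contains k = true →
        k ∈ (P ++ [q]).map Prod.fst := by
      intro k hk
      by_cases hbe : bktS.isEmpty
      · rw [if_pos hbe] at hk
        simp [hsub k hk]
      · rw [if_neg hbe, PySem.Dict.contains_insert] at hk
        rcases Bool.or_eq_true_iff.mp hk with h1 | h2
        · simp [eq_of_beq h1]
        · simp [hsub k h2]
    have hnd2 : (((P ++ [q]) ++ L).map Prod.fst).Nodup := by rw [hPL]; exact hnd
    obtain ⟨ihI, ihC, ihS⟩ := ih (P ++ [q])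
      (if bktS.isEmpty then d else d.insert q.1 bktS) (PySem.Set.update c flt) hnd2 hc2 hsub2
    rw [hPL] at ihI ihC ihS
    rw [List.foldl_cons, hstep]
    refine ⟨?_, ihC, fun k hk => by simpa [hPL] using ihS k hk⟩
    rw [ihI]
    by_cases hbe : bktS.isEmpty
    · rw [if_pos hbe]
      simp only [List.map_cons, List.filter_cons, ← hbktS]
      have : (!bktS.isEmpty) = false := by simp [hbe]
      rw [this]
      simp
    · rw [if_neg hbe, PySem.Dict.items_insert_of_not_contains _ _ hdq1]
      simp only [List.map_cons, List.filter_cons, ← hbktS]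
      have : (!bktS.isEmpty) = true := by simp [hbe]
      rw [this]
      simp [List.append_assoc]

lemma catkeys_ne : ∀ k ∈ CATEGORY_MAP.map Prod.fst, ¬(k = "其他" ∨ k = "無副檔名") := by decide

lemma clsE_other (e : String) :
    (clsE e == "其他") = (decide (e ≠ "_noext") && (firstCat e CATEGORY_MAP).isNone) := by
  by_cases hxn : e = "_noext"
  · simp [clsE, hxn]
  · cases hfc : firstCat e CATEGORY_MAP with
    | none => simp [clsE, hxn, hfc]
    | some c =>
      have hc := catkeys_ne c (firstCat_mem _ _ _ hfc)
      have hne : c ≠ "其他" := fun hh => hc (Or.inl hh)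
      simp only [clsE, if_neg hxn, hfc, Option.getD_some, Option.isNone_some]
      simp [hxn, hne]

lemma clsE_noext (e : String) : (clsE e == "無副檔名") = (e == "_noext") := by
  by_cases hxn : e = "_noext"
  · simp [clsE, hxn]
  · cases hfc : firstCat e CATEGORY_MAP with
    | none =>
      simp only [clsE, if_neg hxn, hfc, Option.getD_none]
      simp [hxn]
    | some c =>
      have hc := catkeys_ne c (firstCat_mem _ _ _ hfc)
      have hne : c ≠ "無副檔名" := fun hh => hc (Or.inr hh)
      simp only [clsE, if_neg hxn, hfc, Option.getD_some]
      simp [hxn, hne]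

lemma clsE_cat (q : String × List String) (hq : q ∈ CATEGORY_MAP) (e : String) :
    (clsE e == q.1) = (decide (e ≠ "_noext") && (firstCat e CATEGORY_MAP == some q.1)) := by
  have hqk := catkeys_ne q.1 (List.mem_map.mpr ⟨q, hq, rfl⟩)
  have hne1 : "無副檔名" ≠ q.1 := fun hh => hqk (Or.inr hh.symm)
  have hne2 : "其他" ≠ q.1 := fun hh => hqk (Or.inl hh.symm)
  by_cases hxn : e = "_noext"
  · simp [clsE, hxn, hne1]
  · cases hfc : firstCat e CATEGORY_MAP with
    | none =>
      simp only [clsE, if_neg hxn, hfc, Option.getD_none]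
      simp [hne2]
    | some c =>
      simp only [clsE, if_neg hxn, hfc, Option.getD_some]
      simp [hxn]

lemma count_pvS (exts : List String) (a : String) : (pvS exts).count a = exts.count a :=
  (PySem.List.sorted_perm exts (fun x => x) false).count_eq a

-- B in the same normal form as A
lemma B_norm (exts : List String) :
    categorize_exts_alt exts =
      (allKeys.map (fun k => (k, (pvS exts).filter (fun e => clsE e == k)))).filter
        (fun p => !p.2.isEmpty) := by
  obtain ⟨hI, hC, hS⟩ := outerLoop exts CATEGORY_MAP [] PySem.Dict.empty PySem.Set.empty
    (by decide)
    (fun e => by simp [PySem.Set.empty, firstCat])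
    (fun k hk => by simp [PySem.Dict.contains_empty] at hk)
  simp only [show PySem.Dict.empty.items = ([] : List (String × List String)) from rfl,
    List.nil_append] at hI hC hS
  simp only [categorize_exts_alt]
  rw [PySem.Dict.foldl_insert_getD_add_one_eq_counter, PySem.Dict.keys_counter]
  rw [show PySem.List.sorted (PySem.Set.ofList exts) (fun x => x) false = pvK exts from rfl]
  set ST := List.foldl (bCatStep (PySem.Dict.counter exts) (pvK exts))
    (PySem.Dict.empty, PySem.Set.empty) CATEGORY_MAP with hST
  -- the '其他' bucket
  have hother : List.foldl (fun acc e =>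
        if e ≠ "_noext" ∧ ¬ PySem.Set.contains ST.2 e = true then
          acc ++ PySem.List.pyRepeat [e] ((PySem.Dict.counter exts).getD e 0)
        else acc) [] (pvK exts)
      = (pvS exts).filter (fun e => clsE e == "其他") := by
    rw [PySem.List.foldl_ite_eq_foldl_filter, PySem.List.foldl_append_eq_flatMap,
      List.nil_append]
    have hcongr : ∀ x ∈ pvK exts,
        (decide (x ≠ "_noext" ∧ ¬ PySem.Set.contains ST.2 x = true)) = (clsE x == "其他") := by
      intro x hx
      rw [clsE_other]
      by_cases hxn : x = "_noext"
      · simp [hxn]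
      · have hmem : (ST.2.contains x = true) ↔ x ∈ ST.2 := by simp
        cases hfc : firstCat x CATEGORY_MAP with
        | none =>
          have hcf : ST.2.contains x = false := by
            rw [Bool.eq_false_iff]
            intro hcx
            obtain ⟨-, -, hs⟩ := (hC x).mp (hmem.mp hcx)
            simp [hfc] at hs
          have hnm : x ∉ ST.2 := fun hm => by rw [← hmem, hcf] at hm; cases hm
          simp [hcf, hnm, hxn, hfc]
        | some c =>
          have hm2 : x ∈ ST.2 := (hC x).mpr ⟨hx, hxn, by simp [hfc]⟩
          have hcx : ST.2.contains x = true := hmem.mpr hm2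
          simp [hcx, hm2, hfc, hxn]
    rw [List.filter_congr hcongr, flatMap_congr_mem (fun x _ => rp_eq exts x),
      ← filter_flatMap_rep _ (fun k => exts.count k) (pvK exts), ← S_flat]
  rw [hother]
  -- the '無副檔名' bucket
  have hnoext : PySem.List.pyRepeat ["_noext"] ((PySem.Dict.counter exts).getD "_noext" 0)
      = (pvS exts).filter (fun e => clsE e == "無副檔名") := by
    rw [rp_eq, List.filter_congr (fun x _ => clsE_noext x), List.filter_beq, count_pvS]
  -- fresh keys for the two trailing inserts
  have hso : ST.1.contains "其他" = false := by
    cases h : ST.1.contains "其他"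
    · rfl
    · exact absurd (catkeys_ne _ (hS _ h)) (by simp)
  have hsn : ST.1.contains "無副檔名" = false := by
    cases h : ST.1.contains "無副檔名"
    · rfl
    · exact absurd (catkeys_ne _ (hS _ h)) (by simp)
  -- A's normal form, split at the two trailing keys
  have hArhs : (allKeys.map (fun k => (k, (pvS exts).filter (fun e => clsE e == k)))).filter
        (fun p => !p.2.isEmpty)
      = ((CATEGORY_MAP.map Prod.fst).map (fun k => (k, (pvS exts).filter (fun e => clsE e == k)))).filter
          (fun p => !p.2.isEmpty)
        ++ (if !((pvS exts).filter (fun e => clsE e == "其他")).isEmpty then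
              [("其他", (pvS exts).filter (fun e => clsE e == "其他"))] else [])
        ++ (if !((pvS exts).filter (fun e => clsE e == "無副檔名")).isEmpty then
              [("無副檔名", (pvS exts).filter (fun e => clsE e == "無副檔名"))] else []) := by
    rw [allKeys, List.map_append, List.filter_append]
    simp only [List.map_cons, List.map_nil, List.filter_cons, List.filter_nil]
    by_cases h1 : ((pvS exts).filter (fun e => clsE e == "其他")).isEmpty <;>
      by_cases h2 : ((pvS exts).filter (fun e => clsE e == "無副檔名")).isEmpty <;>
        simp [h1, h2]
  rw [hArhs]
  -- B's first block equals A's first block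
  have hfirst : (CATEGORY_MAP.map (fun q => (q.1, (pvS exts).filter (fun e =>
        decide (e ≠ "_noext") && (firstCat e CATEGORY_MAP == some q.1))))).filter
          (fun r => !r.2.isEmpty)
      = ((CATEGORY_MAP.map Prod.fst).map (fun k => (k, (pvS exts).filter (fun e => clsE e == k)))).filter
          (fun p => !p.2.isEmpty) := by
    rw [List.map_map]
    refine congrArg _ (List.map_congr_left ?_)
    intro q hq
    simp only [Function.comp]
    rw [List.filter_congr (fun e _ => clsE_cat q hq e)]
  -- emptiness of the noext bucket vs the counter lookup
  have hcn : (PySem.Dict.counter exts).contains "_noext" = exts.contains "_noext" :=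
    PySem.Dict.contains_counter exts "_noext"
  have hFn : (pvS exts).filter (fun e => clsE e == "無副檔名")
      = List.replicate (exts.count "_noext") "_noext" := by
    rw [← hnoext, rp_eq]
  rw [hnoext, hcn, ← hfirst, ← hI]
  by_cases ho : ((pvS exts).filter (fun e => clsE e == "其他")).isEmpty
  · rw [if_pos ho]
    by_cases hn : exts.contains "_noext" = true
    · rw [if_pos hn, PySem.Dict.items_insert_of_not_contains _ _ hsn]
      have hmem : "_noext" ∈ exts := by simpa using hn
      have hFne : ((pvS exts).filter (fun e => clsE e == "無副檔名")).isEmpty = false := by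
        rw [hFn]
        simp [List.count_eq_zero]
        exact hmem
      simp [ho, hFne]
    · rw [if_neg hn]
      have hnm : "_noext" ∉ exts := by simpa using hn
      have hFne : ((pvS exts).filter (fun e => clsE e == "無副檔名")).isEmpty = true := by
        rw [hFn]
        simp [List.count_eq_zero, hnm]
      simp [ho, hFne]
  · rw [if_neg ho]
    have hc1 : (ST.1.insert "其他" ((pvS exts).filter (fun e => clsE e == "其他"))).contains
        "無副檔名" = false := by
      rw [PySem.Dict.contains_insert]
      simp [hsn]
    by_cases hn : exts.contains "_noext" = true
    · rw [if_pos hn, PySem.Dict.items_insert_of_not_contains _ _ hc1,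
        PySem.Dict.items_insert_of_not_contains _ _ hso]
      have hmem : "_noext" ∈ exts := by simpa using hn
      have hFne : ((pvS exts).filter (fun e => clsE e == "無副檔名")).isEmpty = false := by
        rw [hFn]
        simp [List.count_eq_zero]
        exact hmem
      simp [ho, hFne, List.append_assoc]
    · rw [if_neg hn, PySem.Dict.items_insert_of_not_contains _ _ hso]
      have hnm : "_noext" ∉ exts := by simpa using hn
      have hFne : ((pvS exts).filter (fun e => clsE e == "無副檔名")).isEmpty = true := by
        rw [hFn]
        simp [List.count_eq_zero, hnm]
      simp [ho, hFne]

-- ===== VERDICT =====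
theorem categorize_exts_spec : Claim_equal_categorize_exts := by
  intro exts _
  unfold Spec_categorize_exts
  rw [A_norm, B_norm]
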